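-- pv_equiv track=rewrite | github.com/cycleuser/ZhuShou | zhushou/pipeline/orchestrator.py | _find_latest_test_output
-- ===== SOURCE A (Python) =====
-- def _find_latest_test_output(response: str) -> str | None:
--     """Extract the last pytest-style output block from *response*."""
--     lines = response.split("\n")
--     output_lines: list[str] = []
--     capture = False
--
--     for line in lines:
--         if (
--             "pytest" in line.lower()
--             or "PASSED" in line
--             or "FAILED" in line
--             or "ERROR" in line
--         ):
--             capture = True
--         if capture:
--             output_lines.append(line)
--         # pytest summary line like "=== 5 passed ==="
--         if capture and "==" in line and (
--             "passed" in line.lower()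
--             or "error" in line.lower()
--             or "failed" in line.lower()
--         ):
--             break
--
--     return "\n".join(output_lines) if output_lines else None
-- ===== SOURCE B (Python) =====
-- def _find_latest_test_output(response: str) -> str | None:
--     """Extract the first pytest-style output block: locate the trigger line, then take lines through the summary."""
--     lines = response.split("\n")
--     for i, line in enumerate(lines):
--         if (
--             "pytest" in line.lower()
--             or "PASSED" in line
--             or "FAILED" in line
--             or "ERROR" in line
--         ):
--             block = []
--             for l in lines[i:]:
--                 block.append(l)
--                 if "==" in l and (
--                     "passed" in l.lower()
--                     or "error" in l.lower()
--                     or "failed" in l.lower()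
--                 ):
--                     break
--             return "\n".join(block)
--     return None
-- ===== Notes on version B (the rewrite author's own statement) =====
-- stated objective: alternative
-- what changed: Instead of a single pass over all lines carrying a boolean flag and an accumulator, B first scans for the trigger line and then takes the suffix from there through the first summary line (take-until-inclusive), with no flag state.
import Mathlib
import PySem

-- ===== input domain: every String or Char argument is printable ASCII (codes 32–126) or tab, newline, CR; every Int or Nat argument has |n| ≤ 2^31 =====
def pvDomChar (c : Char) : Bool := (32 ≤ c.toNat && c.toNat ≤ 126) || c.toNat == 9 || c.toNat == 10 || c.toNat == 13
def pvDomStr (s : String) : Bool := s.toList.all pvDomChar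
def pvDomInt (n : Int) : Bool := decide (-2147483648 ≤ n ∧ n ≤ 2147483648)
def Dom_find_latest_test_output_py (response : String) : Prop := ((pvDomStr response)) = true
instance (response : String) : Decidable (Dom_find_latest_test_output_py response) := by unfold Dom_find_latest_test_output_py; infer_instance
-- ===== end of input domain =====

-- B replaces A's one-pass capture-flag loop by a trigger scan followed by take-until-summary on the suffix (alternative decomposition, same cost).

-- shared line predicates (the identical expressions appear in both Pythons)
def pvTrig (l : String) : Bool :=
  PySem.Str.isIn "pytest" (PySem.Str.lower l) || PySem.Str.isIn "PASSED" l
    || PySem.Str.isIn "FAILED" l || PySem.Str.isIn "ERROR" l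

def pvSumm (l : String) : Bool :=
  PySem.Str.isIn "==" l &&
    (PySem.Str.isIn "passed" (PySem.Str.lower l) || PySem.Str.isIn "error" (PySem.Str.lower l)
      || PySem.Str.isIn "failed" (PySem.Str.lower l))

-- ===== PORT A =====
-- A's for-loop: state = (output_lines, capture); break when capture ∧ summary
def pvLoopA : List String → List String → Bool → List String
  | [], acc, _ => acc
  | l :: rest, acc, capture =>
    let capture' := if pvTrig l then true else capture
    let acc' := if capture' then acc ++ [l] else acc
    if capture' && pvSumm l then acc' else pvLoopA rest acc' capture'

def find_latest_test_output_py (response : String) : Option String :=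
  let out := pvLoopA (((PySem.Str.split? response "\n").getD [])) [] false
  if out.isEmpty then none else some (PySem.Str.join "\n" out)

-- ===== PORT B =====
-- inner loop of Source B: append each line, stop after the first summary line
def pvTakeB : List String → List String
  | [] => []
  | l :: rest => l :: (if pvSumm l then [] else pvTakeB rest)

-- outer loop of Source B: find the trigger line, then join the block from there
def pvGoB : List String → Option String
  | [] => none
  | l :: rest =>
    if pvTrig l then some (PySem.Str.join "\n" (pvTakeB (l :: rest))) else pvGoB rest

def find_latest_test_output_py_alt (response : String) : Option String :=
  pvGoB (((PySem.Str.split? response "\n").getD []))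

-- ===== PRECONDITION & SPEC =====
def Spec_find_latest_test_output_py (response : String) (out : Option String) : Prop := out = find_latest_test_output_py_alt response
instance (response : String) (out : Option String) : Decidable (Spec_find_latest_test_output_py response out) := by unfold Spec_find_latest_test_output_py; infer_instance

-- ===== CLAIM (what is proved, stated in full; the proofs are below) =====
def Claim_equal_find_latest_test_output_py : Prop := ∀ (response : String), Dom_find_latest_test_output_py response → Spec_find_latest_test_output_py response (find_latest_test_output_py response)

-- ===== LEMMAS AND PROOFS =====

-- once capture is true, A appends every line up to and including the first summary line
theorem pvLoopA_true (xs : List String) : ∀ acc, pvLoopA xs acc true = acc ++ pvTakeB xs := by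
  induction xs with
  | nil => intro acc; simp [pvLoopA, pvTakeB]
  | cons l rest ih =>
    intro acc
    by_cases h : pvSumm l = true <;> simp [pvLoopA, pvTakeB, h, ih]

-- before capture, A's loop agrees with B's trigger scan
theorem pvLoopA_false (xs : List String) :
    (if (pvLoopA xs [] false).isEmpty then none
     else some (PySem.Str.join "\n" (pvLoopA xs [] false))) = pvGoB xs := by
  induction xs with
  | nil => simp [pvLoopA, pvGoB]
  | cons l rest ih =>
    by_cases ht : pvTrig l = true
    · by_cases hs : pvSumm l = true <;>
        simp [pvLoopA, pvGoB, pvTakeB, ht, hs, pvLoopA_true]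
    · simpa [pvLoopA, pvGoB, ht] using ih

-- ===== VERDICT (by name: the statement is the Claim_ definition above) =====
theorem find_latest_test_output_py_spec : Claim_equal_find_latest_test_output_py := by
  intro response _
  unfold Spec_find_latest_test_output_py find_latest_test_output_py find_latest_test_output_py_alt
  exact pvLoopA_false _
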